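-- pv_equiv track=rewrite | github.com/DataDog/guarddog | pysecurity/metadata_analysis/typosquatting.py | _is_distance_one_Levenshtein
-- ===== SOURCE A (Python) =====
-- def _is_distance_one_Levenshtein(name1, name2) -> bool:
--     if abs(len(name1) - len(name2)) > 1:
--         return False
--
--     # Addition to name2
--     if len(name1) > len(name2):
--         for i in range(len(name1)):
--             if name1[:i] + name1[i+1:] == name2:
--                 return True
--
--     # Addition to name1
--     elif len(name2) > len(name1):
--         for i in range(len(name2)):
--             if name2[:i] + name2[i+1:] == name1:
--                 return True
--
--     # Edit character
--     else:
--         for i in range(len(name1)):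
--             if name1[:i] + name1[i+1:] == name2[:i] + name2[i+1:]:
--                 return True
--
--     return False
-- ===== SOURCE B (Python) =====
-- def _is_distance_one_Levenshtein(name1, name2) -> bool:
--     n1, n2 = len(name1), len(name2)
--     if abs(n1 - n2) > 1:
--         return False
--     # skip the longest common prefix
--     i = 0
--     while i < n1 and i < n2 and name1[i] == name2[i]:
--         i += 1
--     # skip the longest common suffix of what is left
--     j = 0
--     while j < n1 - i and j < n2 - i and name1[n1 - 1 - j] == name2[n2 - 1 - j]:
--         j += 1
--     # at most one character may remain unmatched in the longer string
--     return max(n1, n2) - i - j <= 1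
-- ===== Notes on version B (the rewrite author's own statement) =====
-- stated objective: faster
-- what changed: Replaced A's loop that rebuilds and compares a deleted-character copy of the string at every index with a single two-pointer pass that skips the common prefix and suffix and checks that at most one character remains unmatched.
-- intended difference: On the single input ('',''), A returns False while B returns True; two empty strings are at edit distance 0 and A itself returns True for every nonempty equal pair, so B's uniform True is the intended value. — e.g. on _is_distance_one_Levenshtein("", ""): A returns false, B returns true
import Mathlib
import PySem

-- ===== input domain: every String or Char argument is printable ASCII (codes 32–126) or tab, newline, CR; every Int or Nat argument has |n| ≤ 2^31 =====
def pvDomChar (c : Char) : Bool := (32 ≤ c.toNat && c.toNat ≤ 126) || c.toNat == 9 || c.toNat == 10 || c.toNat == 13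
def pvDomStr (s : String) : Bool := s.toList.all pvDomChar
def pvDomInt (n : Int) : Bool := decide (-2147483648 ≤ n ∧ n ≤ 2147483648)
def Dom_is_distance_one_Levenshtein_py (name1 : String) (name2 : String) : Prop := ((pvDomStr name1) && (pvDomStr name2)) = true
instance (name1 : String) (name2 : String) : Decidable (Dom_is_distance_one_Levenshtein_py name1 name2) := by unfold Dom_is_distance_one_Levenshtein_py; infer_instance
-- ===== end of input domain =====

-- B replaces A's quadratic delete-one-copy-and-compare loops by a linear two-pointer
-- prefix/suffix scan (objective: faster).

-- ===== PORT A =====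
def is_distance_one_Levenshtein_py (name1 : String) (name2 : String) : Bool :=
  if ((name1.toList.length : Int) - name2.toList.length).natAbs > 1 then false
  else if name1.toList.length > name2.toList.length then
    -- for i in range(len(name1)): if name1[:i] + name1[i+1:] == name2: return True
    (PySem.List.pyRange 0 name1.toList.length 1).any (fun i =>
      PySem.List.slice name1.toList none (some i) ++ PySem.List.slice name1.toList (some (i + 1)) none == name2.toList)
  else if name2.toList.length > name1.toList.length then
    (PySem.List.pyRange 0 name2.toList.length 1).any (fun i =>
      PySem.List.slice name2.toList none (some i) ++ PySem.List.slice name2.toList (some (i + 1)) none == name1.toList)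
  else
    (PySem.List.pyRange 0 name1.toList.length 1).any (fun i =>
      PySem.List.slice name1.toList none (some i) ++ PySem.List.slice name1.toList (some (i + 1)) none ==
      PySem.List.slice name2.toList none (some i) ++ PySem.List.slice name2.toList (some (i + 1)) none)

-- ===== PORT B =====
-- B's `while i < n1 and i < n2 and name1[i] == name2[i]` loop, transcribed as the
-- structural recursion over the two character lists (exact: it counts the common prefix).
def pvPfxLen : List Char → List Char → Nat
  | a :: s, b :: t => if a = b then pvPfxLen s t + 1 else 0
  | _, _ => 0

def is_distance_one_Levenshtein_py_alt (name1 : String) (name2 : String) : Bool :=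
  if ((name1.toList.length : Int) - name2.toList.length).natAbs > 1 then false
  else
    let i := pvPfxLen name1.toList name2.toList
    -- B's suffix while-loop walks backwards over the unmatched rests: that is the
    -- prefix scan of the reversed rests (exact: same comparisons, same count).
    let j := pvPfxLen (name1.toList.drop i).reverse (name2.toList.drop i).reverse
    decide ((max name1.toList.length name2.toList.length : Int) - i - j ≤ 1)

-- ===== PRECONDITION & SPEC =====
-- On the single input ("",""), A returns False while B returns True; two empty strings are
-- at edit distance 0 and A itself returns True for every nonempty equal pair, so B's
-- uniform True is the intended value.
def D_is_distance_one_Levenshtein_py (name1 : String) (name2 : String) : Prop :=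
  name1 = "" ∧ name2 = ""
instance (name1 : String) (name2 : String) : Decidable (D_is_distance_one_Levenshtein_py name1 name2) := by
  unfold D_is_distance_one_Levenshtein_py; infer_instance

def Spec_is_distance_one_Levenshtein_py (name1 : String) (name2 : String) (out : Bool) : Prop :=
  ¬ D_is_distance_one_Levenshtein_py name1 name2 → out = is_distance_one_Levenshtein_py_alt name1 name2
instance (name1 : String) (name2 : String) (out : Bool) : Decidable (Spec_is_distance_one_Levenshtein_py name1 name2 out) := by
  unfold Spec_is_distance_one_Levenshtein_py; infer_instance

def pvDiffWitness_is_distance_one_Levenshtein_py : String × String := ("", "")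
def pvDiffWitnessOut_is_distance_one_Levenshtein_py : Bool × Bool := (false, true)

-- ===== CLAIM (what is proved, stated in full; the proofs are below) =====
def Claim_unchanged_is_distance_one_Levenshtein_py : Prop := ∀ (name1 : String) (name2 : String), Dom_is_distance_one_Levenshtein_py name1 name2 → Spec_is_distance_one_Levenshtein_py name1 name2 (is_distance_one_Levenshtein_py name1 name2)
def Claim_changed_is_distance_one_Levenshtein_py : Prop := Dom_is_distance_one_Levenshtein_py (pvDiffWitness_is_distance_one_Levenshtein_py.1) (pvDiffWitness_is_distance_one_Levenshtein_py.2) ∧ D_is_distance_one_Levenshtein_py (pvDiffWitness_is_distance_one_Levenshtein_py.1) (pvDiffWitness_is_distance_one_Levenshtein_py.2) ∧ is_distance_one_Levenshtein_py (pvDiffWitness_is_distance_one_Levenshtein_py.1) (pvDiffWitness_is_distance_one_Levenshtein_py.2) = pvDiffWitnessOut_is_distance_one_Levenshtein_py.1 ∧ is_distance_one_Levenshtein_py_alt (pvDiffWitness_is_distance_one_Levenshtein_py.1) (pvDiffWitness_is_distance_one_Levenshtein_py.2) = pvDiffWitnessOut_is_distance_one_Levenshtein_py.2 ∧ pvDiffWitnessOut_is_distance_one_Levenshtein_py.1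 ≠ pvDiffWitnessOut_is_distance_one_Levenshtein_py.2
def Claim_exact_is_distance_one_Levenshtein_py : Prop := ∀ (name1 : String) (name2 : String), Dom_is_distance_one_Levenshtein_py name1 name2 → D_is_distance_one_Levenshtein_py name1 name2 → is_distance_one_Levenshtein_py name1 name2 ≠ is_distance_one_Levenshtein_py_alt name1 name2

-- ===== LEMMAS AND PROOFS =====

-- A's branches with the PySem range/slice machinery rewritten to eraseIdx over List.range.
def pvACore (l1 l2 : List Char) : Bool :=
  if ((l1.length : Int) - l2.length).natAbs > 1 then false
  else if l1.length > l2.length then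
    (List.range l1.length).any (fun k => l1.eraseIdx k == l2)
  else if l2.length > l1.length then
    (List.range l2.length).any (fun k => l2.eraseIdx k == l1)
  else
    (List.range l1.length).any (fun k => l1.eraseIdx k == l2.eraseIdx k)

-- B's body over plain lists.
def pvBCore (l1 l2 : List Char) : Bool :=
  if ((l1.length : Int) - l2.length).natAbs > 1 then false
  else
    let i := pvPfxLen l1 l2
    let j := pvPfxLen (l1.drop i).reverse (l2.drop i).reverse
    decide ((max l1.length l2.length : Int) - i - j ≤ 1)

-- reference predicate: Levenshtein distance ≤ 1, recursively
def pvR : List Char → List Char → Bool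
  | [], t => decide (t.length ≤ 1)
  | s, [] => decide (s.length ≤ 1)
  | a :: s, b :: t => if a = b then pvR s t else (s == t || s == b :: t || a :: s == t)

theorem pv_any_pyRange_erase (l : List Char) (f : Int → Bool) (g : Nat → Bool)
    (h : ∀ k : Nat, f k = g k) :
    (PySem.List.pyRange 0 l.length 1).any f = (List.range l.length).any g := by
  rw [PySem.List.pyRange_one]
  simp only [List.any_map, Int.sub_zero, Int.toNat_natCast]
  congr 1
  funext k
  simpa using h k

theorem pv_slice_erase (l : List Char) (k : Nat) :
    (PySem.List.slice l none (some (k : Int)) ++ PySem.List.slice l (some ((k : Int) + 1)) none)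
      = l.eraseIdx k := by
  have h1 : ((k : Int) + 1) = ((k + 1 : Nat) : Int) := by push_cast; ring
  rw [PySem.List.slice_to_natCast, h1, PySem.List.slice_from_natCast,
    List.eraseIdx_eq_take_drop_succ]

theorem pvA_eq_core (n1 n2 : String) :
    is_distance_one_Levenshtein_py n1 n2 = pvACore n1.toList n2.toList := by
  unfold is_distance_one_Levenshtein_py pvACore
  split_ifs with h1 h2 h3
  · rfl
  · exact pv_any_pyRange_erase _ _ _ (fun k => by rw [pv_slice_erase])
  · exact pv_any_pyRange_erase _ _ _ (fun k => by rw [pv_slice_erase])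
  · exact pv_any_pyRange_erase _ _ _ (fun k => by rw [pv_slice_erase, pv_slice_erase])

theorem pvB_eq_core (n1 n2 : String) :
    is_distance_one_Levenshtein_py_alt n1 n2 = pvBCore n1.toList n2.toList := rfl

theorem pvPfx_ge_iff (k : Nat) : ∀ (u v : List Char),
    (k ≤ pvPfxLen u v) ↔ (k ≤ u.length ∧ k ≤ v.length ∧ u.take k = v.take k) := by
  induction k with
  | zero => intro u v; simp
  | succ k ih =>
    intro u v
    cases u with
    | nil => simp [pvPfxLen]
    | cons a s =>
      cases v with
      | nil => simp [pvPfxLen]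
      | cons b t =>
        simp only [pvPfxLen, List.length_cons, List.take_succ_cons]
        by_cases hab : a = b
        · subst hab
          simp only [if_true, List.cons.injEq, true_and, Nat.add_le_add_iff_right]
          exact ih s t
        · simp only [if_neg hab, List.cons.injEq]
          constructor
          · omega
          · rintro ⟨-, -, hab', -⟩; exact absurd hab' hab

theorem pv_beq_false_of_len {u v : List Char} (h : u.length ≠ v.length) : (u == v) = false := by
  rw [beq_eq_false_iff_ne]
  rintro rfl
  exact h rfl

theorem pvPfxLen_cons_self (a : Char) (s t : List Char) :
    pvPfxLen (a :: s) (a :: t) = pvPfxLen s t + 1 := by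
  simp [pvPfxLen]

theorem pvPfxLen_cons_ne {a b : Char} (hab : a ≠ b) (s t : List Char) :
    pvPfxLen (a :: s) (b :: t) = 0 := by
  simp [pvPfxLen, hab]

theorem pvR_cons_self (a : Char) (s t : List Char) : pvR (a :: s) (a :: t) = pvR s t := by
  simp [pvR]

theorem pvR_cons_ne {a b : Char} (hab : a ≠ b) (s t : List Char) :
    pvR (a :: s) (b :: t) = (s == t || s == b :: t || a :: s == t) := by
  simp [pvR, hab]

-- pvBCore with the Int arithmetic turned into a Nat inequality
theorem pvBCore_closed (l1 l2 : List Char) :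
    pvBCore l1 l2 =
      (if ((l1.length : Int) - l2.length).natAbs > 1 then false
       else decide (max l1.length l2.length ≤
         pvPfxLen l1 l2 +
           pvPfxLen ((l1.drop (pvPfxLen l1 l2)).reverse) ((l2.drop (pvPfxLen l1 l2)).reverse) + 1)) := by
  unfold pvBCore
  split_ifs
  · rfl
  · rw [Bool.eq_iff_iff]
    simp only [decide_eq_true_eq]
    omega

-- the two-pointer core test, characterised when the heads differ
theorem pvB_key {a b : Char} (s t : List Char)
    (hg : s.length ≤ t.length + 1 ∧ t.length ≤ s.length + 1) :
    (max s.length t.length ≤ pvPfxLen (a :: s).reverse (b :: t).reverse)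
      ↔ (s = t ∨ s = b :: t ∨ a :: s = t) := by
  rw [pvPfx_ge_iff]
  simp only [List.reverse_cons]
  rcases Nat.lt_trichotomy s.length t.length with hlt | heq | hgt
  · -- t is one longer: the test says a :: s = t
    have ht : t.length = s.length + 1 := by omega
    have hmax : max s.length t.length = t.length := by omega
    rw [hmax]
    rw [List.take_of_length_le (by simp [ht]), List.take_left' (by simp)]
    constructor
    · rintro ⟨-, -, h⟩
      refine Or.inr (Or.inr ?_)
      have := congrArg List.reverse h
      simpa using this
    · rintro (rfl | rfl | h)
      · omega
      · simp at ht; omega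
      · refine ⟨by simp; omega, by simp, ?_⟩
        rw [← h]
        simp
  · -- equal length: the test says s = t
    have hmax : max s.length t.length = s.length := by omega
    rw [hmax]
    rw [List.take_left' (by simp), List.take_left' (by simp [heq])]
    rw [List.reverse_inj]
    constructor
    · rintro ⟨-, -, h⟩
      exact Or.inl h
    · rintro (rfl | rfl | h)
      · exact ⟨by simp, by simp, rfl⟩
      · simp at heq
      · have := congrArg List.length h; simp at this; omega
  · -- s is one longer: the test says s = b :: t
    have hs : s.length = t.length + 1 := by omega
    have hmax : max s.length t.length = s.length := by omega
    rw [hmax]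
    rw [List.take_left' (by simp), List.take_of_length_le (by simp [hs])]
    constructor
    · rintro ⟨-, -, h⟩
      refine Or.inr (Or.inl ?_)
      have := congrArg List.reverse h
      simpa using this
    · rintro (rfl | rfl | h)
      · omega
      · refine ⟨by simp, by simp, ?_⟩
        simp
      · have := congrArg List.length h; simp at this; omega

theorem pvBCore_eq_R : ∀ l1 l2, pvBCore l1 l2 = pvR l1 l2 := by
  intro l1
  induction l1 with
  | nil =>
    intro l2
    cases l2 with
    | nil => decide
    | cons b t =>
      cases t with
      | nil => simp [pvBCore_closed, pvR, pvPfxLen]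
      | cons c t' =>
        rw [pvBCore_closed, if_pos (by simp; omega)]
        simp [pvR]
  | cons a s ih =>
    intro l2
    cases l2 with
    | nil =>
      cases s with
      | nil => simp [pvBCore_closed, pvR, pvPfxLen]
      | cons c s' =>
        rw [pvBCore_closed, if_pos (by simp; omega)]
        simp [pvR]
    | cons b t =>
      by_cases hab : a = b
      · subst hab
        rw [pvR_cons_self, ← ih t, pvBCore_closed, pvBCore_closed]
        rw [pvPfxLen_cons_self]
        simp only [List.drop_succ_cons, List.length_cons]
        have hg : ((↑(s.length + 1) : Int) - ↑(t.length + 1)).natAbs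
            = ((↑s.length : Int) - ↑t.length).natAbs := by omega
        rw [hg]
        by_cases hG : ((s.length : Int) - t.length).natAbs > 1
        · rw [if_pos hG, if_pos hG]
        · rw [if_neg hG, if_neg hG]
          rw [Bool.eq_iff_iff]
          simp only [decide_eq_true_eq]
          omega
      · rw [pvR_cons_ne hab, pvBCore_closed]
        rw [pvPfxLen_cons_ne hab]
        simp only [List.drop_zero, List.length_cons, Nat.zero_add]
        by_cases hG : ((↑(s.length + 1) : Int) - ↑(t.length + 1)).natAbs > 1
        · rw [if_pos hG]
          rw [pv_beq_false_of_len (by omega), pv_beq_false_of_len (by simp; omega),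
            pv_beq_false_of_len (by simp; omega)]
          simp
        · rw [if_neg hG]
          rw [Bool.eq_iff_iff]
          simp only [decide_eq_true_eq, Bool.or_eq_true, beq_iff_eq]
          rw [or_assoc, ← pvB_key (a := a) (b := b) s t (by omega)]
          omega

-- shifting a `for i in range(n+1)` search one step
theorem pvA_any_shift (f : Nat → Bool) (n : Nat) :
    (List.range (n + 1)).any f = (f 0 || (List.range n).any (fun k => f (k + 1))) := by
  rw [List.range_succ_eq_map]
  simp [List.any_map, Function.comp_def]

theorem pvACore_cons_self {a : Char} (s t : List Char) (hne : ¬ (s = [] ∧ t = [])) :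
    pvACore (a :: s) (a :: t) = pvACore s t := by
  unfold pvACore
  simp only [List.length_cons]
  have hg : ((↑(s.length + 1) : Int) - ↑(t.length + 1)).natAbs
      = ((↑s.length : Int) - ↑t.length).natAbs := by omega
  rw [hg]
  by_cases hG : ((s.length : Int) - t.length).natAbs > 1
  · rw [if_pos hG, if_pos hG]
  · rw [if_neg hG, if_neg hG]
    by_cases h1 : s.length > t.length
    · rw [if_pos (by omega : s.length + 1 > t.length + 1), if_pos h1]
      rw [pvA_any_shift, Bool.eq_iff_iff]
      simp only [Bool.or_eq_true, List.any_eq_true, List.mem_range, beq_iff_eq,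
        List.eraseIdx_cons_zero, List.eraseIdx_cons_succ, List.cons.injEq, true_and]
      constructor
      · rintro (h | ⟨k, hk, h⟩)
        · exact ⟨0, by simp [h], by simp [h]⟩
        · exact ⟨k, by omega, h⟩
      · rintro ⟨k, hk, h⟩
        exact Or.inr ⟨k, by omega, h⟩
    · by_cases h2 : t.length > s.length
      · rw [if_neg (by omega), if_neg h1, if_pos (by omega : t.length + 1 > s.length + 1), if_pos h2]
        rw [pvA_any_shift, Bool.eq_iff_iff]
        simp only [Bool.or_eq_true, List.any_eq_true, List.mem_range, beq_iff_eq,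
          List.eraseIdx_cons_zero, List.eraseIdx_cons_succ, List.cons.injEq, true_and]
        constructor
        · rintro (h | ⟨k, hk, h⟩)
          · exact ⟨0, by simp [h], by simp [h]⟩
          · exact ⟨k, by omega, h⟩
        · rintro ⟨k, hk, h⟩
          exact Or.inr ⟨k, by omega, h⟩
      · rw [if_neg (by omega), if_neg h1, if_neg (by omega), if_neg h2]
        rw [pvA_any_shift, Bool.eq_iff_iff]
        simp only [Bool.or_eq_true, List.any_eq_true, List.mem_range, beq_iff_eq,
          List.eraseIdx_cons_zero, List.eraseIdx_cons_succ, List.cons.injEq, true_and]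
        constructor
        · rintro (h | ⟨k, hk, h⟩)
          · -- s = t: erase index 0 on both sides; s is nonempty by hne
            have hs : s ≠ [] := by
              rintro rfl
              have : t = [] := by subst h; rfl
              exact hne ⟨rfl, this⟩
            exact ⟨0, by cases s with | nil => exact absurd rfl hs | cons _ _ => simp, by rw [h]⟩
          · exact ⟨k, by omega, h⟩
        · rintro ⟨k, hk, h⟩
          exact Or.inr ⟨k, by omega, h⟩

theorem pvACore_cons_ne {a b : Char} (s t : List Char) (hab : a ≠ b) :
    pvACore (a :: s) (b :: t) = (s == t || s == b :: t || a :: s == t) := by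
  unfold pvACore
  simp only [List.length_cons]
  by_cases hG : ((↑(s.length + 1) : Int) - ↑(t.length + 1)).natAbs > 1
  · rw [if_pos hG]
    rw [pv_beq_false_of_len (by omega), pv_beq_false_of_len (by simp; omega),
      pv_beq_false_of_len (by simp; omega)]
    simp
  · rw [if_neg hG]
    by_cases h1 : s.length > t.length
    · rw [if_pos (by omega : s.length + 1 > t.length + 1)]
      rw [pvA_any_shift, Bool.eq_iff_iff]
      simp only [Bool.or_eq_true, List.any_eq_true, List.mem_range, beq_iff_eq,
        List.eraseIdx_cons_zero, List.eraseIdx_cons_succ, List.cons.injEq, hab, false_and,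
        and_false, exists_const, or_false]
      rw [or_assoc]
      constructor
      · intro h
        refine Or.inr (Or.inl h)
      · rintro (h | h | h)
        · have := congrArg List.length h; simp at this; omega
        · exact h
        · have := congrArg List.length h; simp at this; omega
    · by_cases h2 : t.length > s.length
      · rw [if_neg (by omega), if_pos (by omega : t.length + 1 > s.length + 1)]
        rw [pvA_any_shift, Bool.eq_iff_iff]
        simp only [Bool.or_eq_true, List.any_eq_true, List.mem_range, beq_iff_eq,
          List.eraseIdx_cons_zero, List.eraseIdx_cons_succ, List.cons.injEq,
          (Ne.symm hab : b ≠ a), false_and, and_false, exists_const]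
        rw [or_assoc]
        constructor
        · rintro (h | h)
          · exact Or.inr (Or.inr h.symm)
          · exact h.elim
        · rintro (h | h | h)
          · have := congrArg List.length h; simp at this; omega
          · have := congrArg List.length h; simp at this; omega
          · exact Or.inl h.symm
      · rw [if_neg (by omega), if_neg (by omega)]
        rw [pvA_any_shift, Bool.eq_iff_iff]
        simp only [Bool.or_eq_true, List.any_eq_true, List.mem_range, beq_iff_eq,
          List.eraseIdx_cons_zero, List.eraseIdx_cons_succ, List.cons.injEq, hab, false_and,
          and_false, exists_const, or_false]
        rw [or_assoc]
        constructor
        · intro h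
          exact Or.inl h
        · rintro (h | h | h)
          · exact h
          · have := congrArg List.length h; simp at this; omega
          · have := congrArg List.length h; simp at this; omega

theorem pvACore_eq_R : ∀ l1 l2, ¬ (l1 = [] ∧ l2 = []) → pvACore l1 l2 = pvR l1 l2 := by
  intro l1
  induction l1 with
  | nil =>
    intro l2 hne
    cases l2 with
    | nil => exact absurd ⟨rfl, rfl⟩ hne
    | cons b t =>
      cases t with
      | nil => simp [pvACore, pvR, List.range_succ]
      | cons c t' =>
        rw [show pvACore [] (b :: c :: t') =
            (if ((([] : List Char).length : Int) - (b :: c :: t').length).natAbs > 1 then false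
             else if ([] : List Char).length > (b :: c :: t').length then _ else _) from rfl]
        rw [if_pos (by simp; omega)]
        simp [pvR]
  | cons a s ih =>
    intro l2 hne
    cases l2 with
    | nil =>
      cases s with
      | nil => simp [pvACore, pvR, List.range_succ]
      | cons c s' =>
        unfold pvACore
        rw [if_pos (by simp; omega)]
        simp [pvR]
    | cons b t =>
      by_cases hab : a = b
      · subst hab
        by_cases hst : s = [] ∧ t = []
        · obtain ⟨rfl, rfl⟩ := hst
          simp [pvACore, pvR, List.range_succ]
        · rw [pvACore_cons_self s t hst, pvR_cons_self, ih t hst]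
      · rw [pvACore_cons_ne s t hab, pvR_cons_ne hab]

-- ===== VERDICT (by name: the statement is the Claim_ definition above) =====
theorem is_distance_one_Levenshtein_py_spec : Claim_unchanged_is_distance_one_Levenshtein_py := by
  intro n1 n2 _ hd
  rw [pvA_eq_core, pvB_eq_core, pvBCore_eq_R]
  apply pvACore_eq_R
  rintro ⟨h1, h2⟩
  exact hd ⟨by rwa [← String.toList_eq_nil_iff], by rwa [← String.toList_eq_nil_iff]⟩

theorem is_distance_one_Levenshtein_py_changed : Claim_changed_is_distance_one_Levenshtein_py := by
  unfold Claim_changed_is_distance_one_Levenshtein_py; decide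

theorem is_distance_one_Levenshtein_py_tight : Claim_exact_is_distance_one_Levenshtein_py := by
  intro n1 n2 _ hd
  obtain ⟨h1, h2⟩ := hd
  subst h1; subst h2
  decide
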